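-- pv_equiv track=rewrite | github.com/pypi-data/pypi-mirror-399 | packages/nextnextping/nextnextping-1.29.1-py3-none-any.whl/nextnextping/grammer/ttl_parser_worker.py | get_chr_sharp
-- ===== SOURCE A (Python) =====
-- def get_chr_sharp(data: int) -> str:
--     if data <= 0:
--         return chr(data & 0xFF)
--     result = ''
--     while 0 < data:
--         result = chr(data & 0xFF) + result
--         data = data >> 8
--     return result
-- ===== SOURCE B (Python) =====
-- def get_chr_sharp(data: int) -> str:
--     if data <= 0:
--         return chr(data & 0xFF)
--     n = (data.bit_length() + 7) // 8
--     return data.to_bytes(n, 'big').decode('latin-1')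
-- ===== Notes on version B (the rewrite author's own statement) =====
-- stated objective: idiomatic
-- what changed: Replaced the shift/mask/prepend while-loop with a closed-form byte count from bit_length plus a single to_bytes(...,'big').decode('latin-1') conversion.
import Mathlib
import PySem

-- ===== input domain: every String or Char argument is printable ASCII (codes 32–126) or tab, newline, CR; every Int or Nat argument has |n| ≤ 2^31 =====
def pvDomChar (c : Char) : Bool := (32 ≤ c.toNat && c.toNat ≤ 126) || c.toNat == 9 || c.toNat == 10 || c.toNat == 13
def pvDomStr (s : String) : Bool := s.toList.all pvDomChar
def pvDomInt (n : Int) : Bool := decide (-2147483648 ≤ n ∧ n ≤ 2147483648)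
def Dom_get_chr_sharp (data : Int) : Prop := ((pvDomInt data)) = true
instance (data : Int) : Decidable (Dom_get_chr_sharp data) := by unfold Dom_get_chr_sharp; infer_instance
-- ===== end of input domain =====

-- B replaces A's shift/mask/prepend loop by a closed-form byte count (bit_length) plus one
-- big-endian to_bytes/latin-1 decode; objective: idiomatic. Return values proved equal for all ints.

-- ===== PORT A =====
-- the while-loop: result is prepended to, data >>= 8; `data & 0xFF` = data mod 256 (exact:
-- Python's & with the nonneg mask 0xFF is the floor-mod by 256), `data >> 8` = floor-div by 256 (exact)
def get_chr_sharp_go (data : Int) (result : List Char) : List Char :=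
  if _h : 0 < data then
    get_chr_sharp_go (PySem.Int.floordiv data 256) (Char.ofNat (PySem.Int.mod data 256).toNat :: result)
  else result
termination_by data.toNat
decreasing_by
  rw [PySem.Int.floordiv_eq_ediv_of_pos (by norm_num : (0:Int) < 256)]
  omega

def get_chr_sharp (data : Int) : String :=
  if data ≤ 0 then String.ofList [Char.ofNat (PySem.Int.mod data 256).toNat]
  else String.ofList (get_chr_sharp_go data [])

-- ===== PORT B =====
-- data.to_bytes(n,'big').decode('latin-1'): byte i (big-endian) is (data >> 8*(n-1-i)) & 0xFF and
-- latin-1 maps byte b to code point b — exact, ported by hand as a map over range(n)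
def get_chr_sharp_alt (data : Int) : String :=
  if data ≤ 0 then String.ofList [Char.ofNat (PySem.Int.mod data 256).toNat]
  else
    let n : Nat := (PySem.Int.bitLength data + 7) / 8
    String.ofList ((List.range n).map (fun i => Char.ofNat ((data.toNat >>> (8 * (n - 1 - i))) % 256)))

-- ===== PRECONDITION & SPEC =====
def Spec_get_chr_sharp (data : Int) (out : String) : Prop := out = get_chr_sharp_alt data
instance (data : Int) (out : String) : Decidable (Spec_get_chr_sharp data out) := by unfold Spec_get_chr_sharp; infer_instance

-- ===== CLAIM (what is proved, stated in full; the proofs are below) =====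
def Claim_equal_get_chr_sharp : Prop := ∀ (data : Int), Dom_get_chr_sharp data → Spec_get_chr_sharp data (get_chr_sharp data)

-- ===== LEMMAS AND PROOFS =====

-- abstract big-endian byte list of a natural number (proof-side)
def pvBytesN : Nat → List Char
  | m =>
    if h : 0 < m then pvBytesN (m / 256) ++ [Char.ofNat (m % 256)] else []
termination_by m => m
decreasing_by exact Nat.div_lt_self h (by norm_num)

-- proof-side bit length
def pvNbl : Nat → Nat
  | m =>
    if h : 0 < m then pvNbl (m / 2) + 1 else 0
termination_by m => m
decreasing_by exact Nat.div_lt_self h (by norm_num)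

theorem pvNbl_pos {m : Nat} (h : 0 < m) : pvNbl m = pvNbl (m / 2) + 1 := by
  rw [pvNbl]; simp [h]

theorem pvBytesN_pos {m : Nat} (h : 0 < m) :
    pvBytesN m = pvBytesN (m / 256) ++ [Char.ofNat (m % 256)] := by
  rw [pvBytesN]; simp [h]

theorem bitLengthAux_eq : ∀ (fuel m : Nat), m < fuel → PySem.Int.bitLengthAux fuel m = pvNbl m := by
  intro fuel
  induction fuel with
  | zero => intro m h; omega
  | succ f ih =>
    intro m h
    by_cases hm : m = 0
    · subst hm; rw [pvNbl]; simp [PySem.Int.bitLengthAux]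
    · have hstep : PySem.Int.bitLengthAux (f + 1) m = PySem.Int.bitLengthAux f (m / 2) + 1 := by
        rw [PySem.Int.bitLengthAux]; simp [hm]
      rw [hstep, ih (m / 2) (by omega), pvNbl_pos (m := m) (by omega)]

theorem bitLength_eq_pvNbl {d : Int} (h : 0 < d) : PySem.Int.bitLength d = pvNbl d.toNat := by
  unfold PySem.Int.bitLength
  rw [bitLengthAux_eq _ _ (by omega)]
  congr 1
  omega

theorem pvNbl_div256 {m : Nat} (h : 256 ≤ m) : pvNbl m = pvNbl (m / 256) + 8 := by
  rw [pvNbl_pos (by omega), pvNbl_pos (m := m / 2) (by omega),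
      pvNbl_pos (m := m / 2 / 2) (by omega), pvNbl_pos (m := m / 2 / 2 / 2) (by omega),
      pvNbl_pos (m := m / 2 / 2 / 2 / 2) (by omega),
      pvNbl_pos (m := m / 2 / 2 / 2 / 2 / 2) (by omega),
      pvNbl_pos (m := m / 2 / 2 / 2 / 2 / 2 / 2) (by omega),
      pvNbl_pos (m := m / 2 / 2 / 2 / 2 / 2 / 2 / 2) (by omega)]
  have : m / 2 / 2 / 2 / 2 / 2 / 2 / 2 / 2 = m / 256 := by omega
  rw [this]

theorem pvNbl_le_of_lt_pow : ∀ (k m : Nat), m < 2 ^ k → pvNbl m ≤ k := by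
  intro k
  induction k with
  | zero => intro m h; interval_cases m; rw [pvNbl]; simp
  | succ k ih =>
    intro m h
    by_cases hm : m = 0
    · subst hm; rw [pvNbl]; simp
    · rw [pvNbl_pos (by omega)]
      have : m / 2 < 2 ^ k := by
        have := Nat.pow_succ 2 k
        omega
      exact Nat.succ_le_succ (ih _ this)

theorem pvNbl_small {m : Nat} (h0 : 0 < m) (h : m < 256) : (pvNbl m + 7) / 8 = 1 := by
  have h1 : 1 ≤ pvNbl m := by rw [pvNbl_pos h0]; omega
  have h2 : pvNbl m ≤ 8 := pvNbl_le_of_lt_pow 8 m (by norm_num; omega)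
  omega

-- B's closed form computes exactly the big-endian bytes
theorem pvBytesN_eq_map : ∀ (m : Nat), 0 < m →
    pvBytesN m = (List.range ((pvNbl m + 7) / 8)).map
      (fun i => Char.ofNat ((m >>> (8 * ((pvNbl m + 7) / 8 - 1 - i))) % 256)) := by
  intro m
  induction m using Nat.strong_induction_on with
  | _ m ih =>
    intro hm
    by_cases hs : m < 256
    · rw [pvNbl_small hm hs, pvBytesN_pos hm, pvBytesN]
      simp [Nat.div_eq_of_lt hs, List.range_succ, Nat.shiftRight_eq_div_pow]
    · have h256 : 256 ≤ m := by omega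
      have hq : 0 < m / 256 := by omega
      have hn : (pvNbl m + 7) / 8 = (pvNbl (m / 256) + 7) / 8 + 1 := by
        rw [pvNbl_div256 h256]; omega
      rw [pvBytesN_pos hm, ih (m / 256) (Nat.div_lt_self hm (by norm_num)) hq, hn]
      set k := (pvNbl (m / 256) + 7) / 8 with hk
      rw [List.range_succ, List.map_append, List.map_singleton]
      congr 1
      · apply List.map_congr_left
        intro i hi
        have hik : i < k := List.mem_range.mp hi
        have harg : k + 1 - 1 - i = (k - 1 - i) + 1 := by omega
        rw [harg]
        congr 2
        rw [Nat.shiftRight_eq_div_pow, Nat.shiftRight_eq_div_pow]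
        have : 8 * ((k - 1 - i) + 1) = 8 * (k - 1 - i) + 8 := by ring
        rw [this, pow_add]
        rw [Nat.div_div_eq_div_mul, Nat.mul_comm]
        norm_num
      · simp [Nat.shiftRight_eq_div_pow]

-- A's loop accumulates exactly the big-endian bytes
theorem get_chr_sharp_go_eq : ∀ (m : Nat) (d : Int) (acc : List Char), d.toNat = m → 0 ≤ d →
    get_chr_sharp_go d acc = pvBytesN d.toNat ++ acc := by
  intro m
  induction m using Nat.strong_induction_on with
  | _ m ih =>
    intro d acc hdm hd
    rw [get_chr_sharp_go]
    by_cases h : 0 < d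
    · rw [dif_pos h]
      have hdiv : PySem.Int.floordiv d 256 = d / 256 :=
        PySem.Int.floordiv_eq_ediv_of_pos (by norm_num)
      have hmod : PySem.Int.mod d 256 = d % 256 :=
        PySem.Int.mod_eq_emod_of_pos (by norm_num)
      have h1 : (d / 256).toNat = d.toNat / 256 := by omega
      have h2 : (d % 256).toNat = d.toNat % 256 := by omega
      rw [hdiv, hmod, ih (d / 256).toNat (by omega) _ _ rfl (by omega)]
      rw [pvBytesN_pos (m := d.toNat) (by omega), h1, h2, List.append_assoc]
      rfl
    · rw [dif_neg h]
      have : d.toNat = 0 := by omega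
      rw [this, pvBytesN]
      simp

-- ===== VERDICT (by name: the statement is the Claim_ definition above) =====
theorem get_chr_sharp_spec : Claim_equal_get_chr_sharp := by
  intro data _
  unfold Spec_get_chr_sharp get_chr_sharp get_chr_sharp_alt
  by_cases h : data ≤ 0
  · rw [if_pos h, if_pos h]
  · rw [if_neg h, if_neg h]
    have hd : 0 < data := by omega
    rw [get_chr_sharp_go_eq data.toNat data [] rfl (by omega), List.append_nil]
    rw [bitLength_eq_pvNbl hd]
    exact congrArg String.ofList (pvBytesN_eq_map data.toNat (by omega))
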